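-- pv_equiv track=rewrite | github.com/starrycw/CAC-Parity | Python/OC_ErrorDetectionSeq/CACParitySeq_EncoderCore.py | FPFParity_EncoderCore
-- ===== SOURCE A (Python) =====
-- import copy
--
-- def FPFParity_EncoderCore(seq_c: tuple[int, ...], seq_d:tuple[int, ...]) -> tuple[int, ...]:
--     '''
--     Generate binary sequence G from binary sequences C and D.\n
--     The input sequences C and D must have the same length.\n
--     The elements in each sequence must be 0 or 1 (int).\n
--
--     :param seq_c:
--     :param seq_d:
--     :return:
--     '''
--     assert isinstance(seq_c, tuple)
--     assert isinstance(seq_d, tuple)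
--     seqLen = len(seq_c)
--     assert len(seq_d) == seqLen
--
--     # Step 1:
--     seq_e_list = []
--     for idx_i in range(0, seqLen):
--         assert seq_c[idx_i] in (0, 1)
--         assert seq_d[idx_i] in (0, 1)
--         if idx_i % 2 == 0:  # XOR
--             if seq_c[idx_i] == seq_d[idx_i]:
--                 seq_e_list.append(0)
--             else:
--                 seq_e_list.append(1)
--         elif idx_i % 2 == 1:  # XNOR
--             if seq_c[idx_i] == seq_d[idx_i]:
--                 seq_e_list.append(1)
--             else:
--                 seq_e_list.append(0)
--         else:
--             assert False
--     seq_e = tuple(seq_e_list)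
--
--     # Step 2:
--     for idx_i in range(0, seqLen):
--         assert seq_e[idx_i] in (0, 1)
--     seq_f_list = copy.deepcopy(seq_e_list)
--     for idx_i in range(2, seqLen - 1):
--         if idx_i % 2 == 0:
--             if (seq_e[idx_i - 1], seq_e[idx_i], seq_e[idx_i + 1]) in ((1, 0, 1), (0, 1, 0)):
--                 seq_f_list[idx_i] = 1 - seq_f_list[idx_i]
--     seq_f = tuple(seq_f_list)
--
--     # Step 3:
--     for idx_i in range(0, seqLen):
--         assert seq_f[idx_i] in (0, 1)
--     seq_g_list = copy.deepcopy(seq_f_list)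
--     for idx_i in range(1, seqLen - 1):
--         if idx_i % 2 == 1:
--             if (seq_f[idx_i - 1], seq_f[idx_i], seq_f[idx_i + 1]) in ((1, 0, 1), (0, 1, 0)):
--                 seq_g_list[idx_i] = 1 - seq_g_list[idx_i]
--     seq_g = tuple(seq_g_list)
--
--     for idx_i in range(0, seqLen):
--         assert seq_g[idx_i] in (0, 1)
--
--     return seq_g
-- ===== SOURCE B (Python) =====
-- def FPFParity_EncoderCore(seq_c: tuple, seq_d: tuple) -> tuple:
--     """Compute each output bit directly from a local window of C and D,
--     with no intermediate sequences and no in-place mutation."""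
--     assert isinstance(seq_c, tuple)
--     assert isinstance(seq_d, tuple)
--     n = len(seq_c)
--     assert len(seq_d) == n
--     for i in range(n):
--         assert seq_c[i] in (0, 1)
--         assert seq_d[i] in (0, 1)
--
--     def e(i):
--         x = 0 if seq_c[i] == seq_d[i] else 1
--         return x if i % 2 == 0 else 1 - x
--
--     def f(i):
--         v = e(i)
--         if i % 2 == 0 and 2 <= i <= n - 2 and (e(i - 1), v, e(i + 1)) in ((1, 0, 1), (0, 1, 0)):
--             v = 1 - v
--         return v
--
--     def g(i):
--         v = f(i)
--         if i % 2 == 1 and i <= n - 2 and (f(i - 1), v, f(i + 1)) in ((1, 0, 1), (0, 1, 0)):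
--             v = 1 - v
--         return v
--
--     return tuple(g(i) for i in range(n))
-- ===== Notes on version B (the rewrite author's own statement) =====
-- stated objective: alternative
-- what changed: A builds three full intermediate sequences (e, then a deep-copied f mutated in place, then a deep-copied g mutated in place); B builds no intermediate sequences at all and computes each output bit directly as a pure function of a 5-element local window of C and D.
import Mathlib
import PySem

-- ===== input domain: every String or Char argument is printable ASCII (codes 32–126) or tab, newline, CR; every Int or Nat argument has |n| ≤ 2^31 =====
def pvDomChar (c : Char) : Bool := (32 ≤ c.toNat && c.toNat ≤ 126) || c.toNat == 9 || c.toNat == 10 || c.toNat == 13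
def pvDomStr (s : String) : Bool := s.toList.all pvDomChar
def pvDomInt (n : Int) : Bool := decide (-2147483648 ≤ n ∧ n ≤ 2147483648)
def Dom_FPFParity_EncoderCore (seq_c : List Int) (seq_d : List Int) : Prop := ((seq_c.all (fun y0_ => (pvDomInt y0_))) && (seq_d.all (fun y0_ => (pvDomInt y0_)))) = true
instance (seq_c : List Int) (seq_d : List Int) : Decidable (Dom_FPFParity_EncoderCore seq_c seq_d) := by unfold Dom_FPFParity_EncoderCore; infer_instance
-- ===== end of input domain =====

-- B computes each output bit directly from a local window (no intermediate sequences, no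
-- in-place mutation); equal return value to A on Pre_ (A's asserts are excluded by Pre_).

-- ===== PORT A =====
-- Literal port of A: three sequential passes, the 2nd and 3rd mutating a copy in place.
def FPFParity_EncoderCore (seq_c : List Int) (seq_d : List Int) : List Int :=
  let seqLen : Int := PySem.List.len seq_c
  -- Step 1
  let seq_e_list : List Int :=
    (PySem.List.pyRange 0 seqLen 1).foldl (fun acc idx_i =>
      if PySem.Int.mod idx_i 2 = 0 then
        (if PySem.List.pyGetD seq_c idx_i 0 = PySem.List.pyGetD seq_d idx_i 0 then
          acc ++ [0] else acc ++ [1])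
      else if PySem.Int.mod idx_i 2 = 1 then
        (if PySem.List.pyGetD seq_c idx_i 0 = PySem.List.pyGetD seq_d idx_i 0 then
          acc ++ [1] else acc ++ [0])
      else acc) []  -- final 'else' is Python's unreachable 'assert False'
  let seq_e := seq_e_list
  -- Step 2
  let seq_f_list : List Int :=
    (PySem.List.pyRange 2 (seqLen - 1) 1).foldl (fun acc idx_i =>
      if PySem.Int.mod idx_i 2 = 0 then
        (if (PySem.List.pyGetD seq_e (idx_i - 1) 0, PySem.List.pyGetD seq_e idx_i 0,
              PySem.List.pyGetD seq_e (idx_i + 1) 0) = ((1 : Int), (0 : Int), (1 : Int)) ∨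
            (PySem.List.pyGetD seq_e (idx_i - 1) 0, PySem.List.pyGetD seq_e idx_i 0,
              PySem.List.pyGetD seq_e (idx_i + 1) 0) = ((0 : Int), (1 : Int), (0 : Int)) then
          PySem.List.pySetD acc idx_i (1 - PySem.List.pyGetD acc idx_i 0)
        else acc)
      else acc) seq_e_list
  let seq_f := seq_f_list
  -- Step 3
  let seq_g_list : List Int :=
    (PySem.List.pyRange 1 (seqLen - 1) 1).foldl (fun acc idx_i =>
      if PySem.Int.mod idx_i 2 = 1 then
        (if (PySem.List.pyGetD seq_f (idx_i - 1) 0, PySem.List.pyGetD seq_f idx_i 0,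
              PySem.List.pyGetD seq_f (idx_i + 1) 0) = ((1 : Int), (0 : Int), (1 : Int)) ∨
            (PySem.List.pyGetD seq_f (idx_i - 1) 0, PySem.List.pyGetD seq_f idx_i 0,
              PySem.List.pyGetD seq_f (idx_i + 1) 0) = ((0 : Int), (1 : Int), (0 : Int)) then
          PySem.List.pySetD acc idx_i (1 - PySem.List.pyGetD acc idx_i 0)
        else acc)
      else acc) seq_f_list
  seq_g_list

-- ===== PORT B =====
-- Source B's local helper e(i): the XOR/XNOR bit at index i.
def pvEB (seq_c : List Int) (seq_d : List Int) (i : Nat) : Int :=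
  let x : Int := if seq_c.getD i 0 = seq_d.getD i 0 then 0 else 1
  if i % 2 = 0 then x else 1 - x

-- Source B's local helper f(i): e(i), flipped by the even-index window rule.
def pvFB (seq_c : List Int) (seq_d : List Int) (n : Nat) (i : Nat) : Int :=
  let v := pvEB seq_c seq_d i
  if i % 2 = 0 ∧ 2 ≤ i ∧ i ≤ n - 2 ∧
      ((pvEB seq_c seq_d (i - 1), v, pvEB seq_c seq_d (i + 1)) = ((1 : Int), (0 : Int), (1 : Int)) ∨
       (pvEB seq_c seq_d (i - 1), v, pvEB seq_c seq_d (i + 1)) = ((0 : Int), (1 : Int), (0 : Int)))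
  then 1 - v else v

-- Source B's local helper g(i): f(i), flipped by the odd-index window rule.
def pvGB (seq_c : List Int) (seq_d : List Int) (n : Nat) (i : Nat) : Int :=
  let v := pvFB seq_c seq_d n i
  if i % 2 = 1 ∧ i ≤ n - 2 ∧
      ((pvFB seq_c seq_d n (i - 1), v, pvFB seq_c seq_d n (i + 1)) = ((1 : Int), (0 : Int), (1 : Int)) ∨
       (pvFB seq_c seq_d n (i - 1), v, pvFB seq_c seq_d n (i + 1)) = ((0 : Int), (1 : Int), (0 : Int)))
  then 1 - v else v

def FPFParity_EncoderCore_alt (seq_c : List Int) (seq_d : List Int) : List Int :=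
  (List.range seq_c.length).map (pvGB seq_c seq_d seq_c.length)

-- ===== PRECONDITION & SPEC =====
-- Pre_ excludes exactly the inputs on which A's asserts raise AssertionError:
-- unequal lengths, or an element of either sequence that is not 0 or 1.
def Pre_FPFParity_EncoderCore (seq_c : List Int) (seq_d : List Int) : Prop :=
  seq_c.length = seq_d.length ∧ (∀ x ∈ seq_c, x = 0 ∨ x = 1) ∧ (∀ x ∈ seq_d, x = 0 ∨ x = 1)
instance (seq_c : List Int) (seq_d : List Int) : Decidable (Pre_FPFParity_EncoderCore seq_c seq_d) := by
  unfold Pre_FPFParity_EncoderCore; infer_instance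

def pvWitness_FPFParity_EncoderCore : List Int × List Int := ([0, 1, 1, 0, 1], [1, 1, 0, 0, 0])

def Spec_FPFParity_EncoderCore (seq_c : List Int) (seq_d : List Int) (out : List Int) : Prop := out = FPFParity_EncoderCore_alt seq_c seq_d
instance (seq_c : List Int) (seq_d : List Int) (out : List Int) : Decidable (Spec_FPFParity_EncoderCore seq_c seq_d out) := by unfold Spec_FPFParity_EncoderCore; infer_instance

-- ===== CLAIM (what is proved, stated in full; the proofs are below) =====
def Claim_equal_FPFParity_EncoderCore : Prop := ∀ (seq_c : List Int) (seq_d : List Int), Dom_FPFParity_EncoderCore seq_c seq_d → Pre_FPFParity_EncoderCore seq_c seq_d → Spec_FPFParity_EncoderCore seq_c seq_d (FPFParity_EncoderCore seq_c seq_d)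

-- ===== LEMMAS AND PROOFS =====

-- setting one cell of a range-map is a range-map with a pointwise update
lemma set_map_range {n j : Nat} (ψ : Nat → Int) (v : Int) (_hj : j < n) :
    ((List.range n).map ψ).set j v = (List.range n).map (fun i => if i = j then v else ψ i) := by
  apply List.ext_getElem (by simp)
  intro i h1 h2
  simp only [List.getElem_set, List.getElem_map, List.getElem_range]
  split_ifs with h h' <;> first | rfl | omega

-- the in-place flip loop over a Nodup list of in-range indices, elementwise
lemma foldl_flip (n : Nat) (l : List Int) (φ : Nat → Int)
    (hb : ∀ idx ∈ l, 0 ≤ idx ∧ idx < (n : Int)) (hnd : l.Nodup) :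
    l.foldl (fun acc idx => PySem.List.pySetD acc idx (1 - PySem.List.pyGetD acc idx 0))
      ((List.range n).map φ)
    = (List.range n).map (fun (j : Nat) => if (j : Int) ∈ l then 1 - φ j else φ j) := by
  induction l generalizing φ with
  | nil => simp
  | cons idx t ih =>
    obtain ⟨h0, hlt⟩ := hb idx (by simp)
    have hidx : idx = ((idx.toNat : Nat) : Int) := by omega
    have htn : idx.toNat < n := by omega
    simp only [List.foldl_cons]
    rw [hidx, PySem.List.pyGetD_natCast, PySem.List.getD_map_range _ _ _ _ htn,
      PySem.List.pySetD_natCast, set_map_range _ _ htn,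
      ih _ (fun x hx => hb x (by simp [hx])) hnd.of_cons]
    apply List.map_congr_left
    intro j hj
    simp only [List.mem_range] at hj
    simp only [List.mem_cons, ← hidx]
    by_cases hje : (j : Int) = idx
    · have hjt : (j : Int) ∉ t := hje ▸ (List.nodup_cons.mp hnd).1
      have hn : j = idx.toNat := by omega
      rw [if_neg hjt, if_pos (Or.inl hje), if_pos hn, hn]
    · have hn : j ≠ idx.toNat := by omega
      rw [if_neg hn]
      by_cases ht : (j : Int) ∈ t
      · rw [if_pos ht, if_pos (Or.inr ht)]
      · rw [if_neg ht, if_neg (by tauto)]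

-- Step 1 of A builds exactly the pointwise e-sequence of B
lemma seq_e_eq (seq_c seq_d : List Int) :
    (PySem.List.pyRange 0 (PySem.List.len seq_c) 1).foldl (fun acc idx_i =>
      if PySem.Int.mod idx_i 2 = 0 then
        (if PySem.List.pyGetD seq_c idx_i 0 = PySem.List.pyGetD seq_d idx_i 0 then
          acc ++ [0] else acc ++ [1])
      else if PySem.Int.mod idx_i 2 = 1 then
        (if PySem.List.pyGetD seq_c idx_i 0 = PySem.List.pyGetD seq_d idx_i 0 then
          acc ++ [1] else acc ++ [0])
      else acc) []
    = (List.range seq_c.length).map (pvEB seq_c seq_d) := by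
  rw [PySem.List.len_eq, PySem.List.pyRange_zero_nat, List.foldl_map,
    PySem.List.foldl_congr_mem _ _ (fun acc (k : Nat) => acc ++ [pvEB seq_c seq_d k]) _ ?_,
    PySem.List.foldl_append_singleton_eq_map, List.nil_append]
  intro acc k hk
  have hm : PySem.Int.mod (k : Int) 2 = ((k % 2 : Nat) : Int) := by
    exact_mod_cast PySem.Int.mod_natCast k 2
  simp only [PySem.List.pyGetD_natCast, pvEB, hm]
  rcases Nat.even_or_odd k with h | h
  · have h2 : k % 2 = 0 := Nat.even_iff.mp h
    rw [h2]
    norm_num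
    split_ifs <;> rfl
  · have h2 : k % 2 = 1 := Nat.odd_iff.mp h
    rw [h2]
    norm_num
    split_ifs <;> norm_num

-- membership characterisation of the twice-filtered range the flip loops run over
lemma mem_filtered_range (lo hi : Int) (p q : Int → Prop) [DecidablePred p] [DecidablePred q]
    (x : Int) :
    x ∈ ((PySem.List.pyRange lo hi 1).filter (fun y => decide (p y))).filter (fun y => decide (q y))
    ↔ (lo ≤ x ∧ x < hi) ∧ p x ∧ q x := by
  simp only [List.mem_filter, PySem.List.mem_pyRange_one, decide_eq_true_eq]
  tauto

-- Steps 2/3 of A: the conditional in-place flip pass over a frozen base sequence, elementwise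
lemma flip_pass (n : Nat) (lo : Int) (hlo : 0 ≤ lo)
    (φ : Nat → Int) (p q : Int → Prop) [DecidablePred p] [DecidablePred q] :
    (PySem.List.pyRange lo ((n : Int) - 1) 1).foldl (fun acc idx_i =>
      if p idx_i then
        (if q idx_i then PySem.List.pySetD acc idx_i (1 - PySem.List.pyGetD acc idx_i 0) else acc)
      else acc) ((List.range n).map φ)
    = (List.range n).map (fun (j : Nat) =>
        if (lo ≤ (j : Int) ∧ (j : Int) < (n : Int) - 1) ∧ p (j : Int) ∧ q (j : Int) then 1 - φ j
        else φ j) := by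
  rw [PySem.List.foldl_ite_eq_foldl_filter, PySem.List.foldl_ite_eq_foldl_filter,
    foldl_flip n _ φ ?_ ?_]
  · apply List.map_congr_left
    intro j _
    simp only [mem_filtered_range]
  · intro idx hidx
    have := (mem_filtered_range lo ((n : Int) - 1) p q idx).mp hidx
    omega
  · exact ((PySem.List.nodup_pyRange_one lo ((n : Int) - 1)).filter _).filter _

-- the f-stage elementwise characterisation: A's flipped cell j IS Source B's f(j)
lemma pvFB_point (seq_c seq_d : List Int) (j : Nat) :
    (if (2 ≤ (j : Int) ∧ (j : Int) < (seq_c.length : Int) - 1) ∧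
        PySem.Int.mod (j : Int) 2 = 0 ∧
        ((PySem.List.pyGetD ((List.range seq_c.length).map (pvEB seq_c seq_d)) ((j : Int) - 1) 0,
          PySem.List.pyGetD ((List.range seq_c.length).map (pvEB seq_c seq_d)) ((j : Int)) 0,
          PySem.List.pyGetD ((List.range seq_c.length).map (pvEB seq_c seq_d)) ((j : Int) + 1) 0)
            = ((1 : Int), (0 : Int), (1 : Int)) ∨
         (PySem.List.pyGetD ((List.range seq_c.length).map (pvEB seq_c seq_d)) ((j : Int) - 1) 0,
          PySem.List.pyGetD ((List.range seq_c.length).map (pvEB seq_c seq_d)) ((j : Int)) 0,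
          PySem.List.pyGetD ((List.range seq_c.length).map (pvEB seq_c seq_d)) ((j : Int) + 1) 0)
            = ((0 : Int), (1 : Int), (0 : Int)))
     then 1 - pvEB seq_c seq_d j else pvEB seq_c seq_d j)
    = pvFB seq_c seq_d seq_c.length j := by
  simp only [pvFB]
  refine if_congr ?_ rfl rfl
  have hm : PySem.Int.mod (j : Int) 2 = ((j % 2 : Nat) : Int) := by
    exact_mod_cast PySem.Int.mod_natCast j 2
  by_cases h : 2 ≤ j ∧ j + 1 < seq_c.length
  · have e1 : (j : Int) - 1 = ((j - 1 : Nat) : Int) := by omega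
    have e2 : (j : Int) + 1 = ((j + 1 : Nat) : Int) := by omega
    rw [e1, e2, hm, PySem.List.pyGetD_natCast, PySem.List.pyGetD_natCast,
      PySem.List.pyGetD_natCast,
      PySem.List.getD_map_range _ _ _ _ (by omega), PySem.List.getD_map_range _ _ _ _ (by omega),
      PySem.List.getD_map_range _ _ _ _ (by omega)]
    constructor
    · rintro ⟨⟨a, b⟩, m, q⟩
      exact ⟨by omega, by omega, by omega, q⟩
    · rintro ⟨m, a, b, q⟩
      exact ⟨⟨by omega, by omega⟩, by omega, q⟩
  · constructor
    · rintro ⟨⟨a, b⟩, -, -⟩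
      exact absurd (by omega) h
    · rintro ⟨m, a, b, -⟩
      exact absurd (by omega) h

-- the g-stage elementwise characterisation: A's flipped cell j IS Source B's g(j)
lemma pvGB_point (seq_c seq_d : List Int) (j : Nat) :
    (if (1 ≤ (j : Int) ∧ (j : Int) < (seq_c.length : Int) - 1) ∧
        PySem.Int.mod (j : Int) 2 = 1 ∧
        ((PySem.List.pyGetD ((List.range seq_c.length).map (pvFB seq_c seq_d seq_c.length)) ((j : Int) - 1) 0,
          PySem.List.pyGetD ((List.range seq_c.length).map (pvFB seq_c seq_d seq_c.length)) ((j : Int)) 0,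
          PySem.List.pyGetD ((List.range seq_c.length).map (pvFB seq_c seq_d seq_c.length)) ((j : Int) + 1) 0)
            = ((1 : Int), (0 : Int), (1 : Int)) ∨
         (PySem.List.pyGetD ((List.range seq_c.length).map (pvFB seq_c seq_d seq_c.length)) ((j : Int) - 1) 0,
          PySem.List.pyGetD ((List.range seq_c.length).map (pvFB seq_c seq_d seq_c.length)) ((j : Int)) 0,
          PySem.List.pyGetD ((List.range seq_c.length).map (pvFB seq_c seq_d seq_c.length)) ((j : Int) + 1) 0)
            = ((0 : Int), (1 : Int), (0 : Int)))
     then 1 - pvFB seq_c seq_d seq_c.length j else pvFB seq_c seq_d seq_c.length j)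
    = pvGB seq_c seq_d seq_c.length j := by
  simp only [pvGB]
  refine if_congr ?_ rfl rfl
  have hm : PySem.Int.mod (j : Int) 2 = ((j % 2 : Nat) : Int) := by
    exact_mod_cast PySem.Int.mod_natCast j 2
  by_cases h : 1 ≤ j ∧ j + 1 < seq_c.length
  · have e1 : (j : Int) - 1 = ((j - 1 : Nat) : Int) := by omega
    have e2 : (j : Int) + 1 = ((j + 1 : Nat) : Int) := by omega
    rw [e1, e2, hm, PySem.List.pyGetD_natCast, PySem.List.pyGetD_natCast,
      PySem.List.pyGetD_natCast,
      PySem.List.getD_map_range _ _ _ _ (by omega), PySem.List.getD_map_range _ _ _ _ (by omega),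
      PySem.List.getD_map_range _ _ _ _ (by omega)]
    constructor
    · rintro ⟨⟨a, b⟩, m, q⟩
      exact ⟨by omega, by omega, q⟩
    · rintro ⟨m, b, q⟩
      exact ⟨⟨by omega, by omega⟩, by omega, q⟩
  · constructor
    · rintro ⟨⟨a, b⟩, -, -⟩
      exact absurd (by omega) h
    · rintro ⟨m, b, -⟩
      exact absurd (by omega) h

-- ===== VERDICT (by name: the statement is the Claim_ definition above) =====
theorem FPFParity_EncoderCore_spec : Claim_equal_FPFParity_EncoderCore := by
  intro seq_c seq_d _ _
  unfold Spec_FPFParity_EncoderCore FPFParity_EncoderCore FPFParity_EncoderCore_alt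
  dsimp only
  rw [seq_e_eq, PySem.List.len_eq]
  rw [flip_pass seq_c.length 2 (by norm_num) (pvEB seq_c seq_d)]
  simp only [pvFB_point]
  rw [flip_pass seq_c.length 1 (by norm_num) (pvFB seq_c seq_d seq_c.length)]
  simp only [pvGB_point]
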